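-- pv_equiv track=rewrite | github.com/mrrajamiaraj/cse-327-project | core/huggingface_service.py | classify_restaurant_type
-- ===== SOURCE A (Python) =====
-- def classify_restaurant_type(name, cuisine):
--     """Classify restaurant type based on name and cuisine"""
--     name_lower = name.lower()
--     cuisine_lower = cuisine.lower()
--
--     if any(word in name_lower for word in ['coffee', 'cafe', 'brew']):
--         return 'coffee_shop'
--     elif any(word in name_lower for word in ['dessert', 'sweet', 'ice cream']):
--         return 'dessert_shop'
--     elif any(word in name_lower for word in ['bakery', 'bread']):
--         return 'bakery'
--     elif any(word in cuisine_lower for word in ['fast food', 'burger', 'pizza']):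
--         return 'fast_food'
--     elif any(word in cuisine_lower for word in ['traditional', 'bengali', 'bangladeshi']):
--         return 'traditional'
--     else:
--         return 'restaurant'
-- ===== SOURCE B (Python) =====
-- # Select-min aggregation: score every keyword independently (alphabetical scan, no
-- # short-circuit cascade), then return the label with the smallest matched priority.
-- LABELS = ['coffee_shop', 'dessert_shop', 'bakery', 'fast_food', 'traditional']
--
-- # (keyword, priority, which text: 0 = name, 1 = cuisine), in alphabetical order --
-- # order is irrelevant because we take the minimum priority over all matches.
-- KEYWORDS = [
--     ('bakery', 2, 0), ('bangladeshi', 4, 1), ('bengali', 4, 1), ('bread', 2, 0),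
--     ('brew', 0, 0), ('burger', 3, 1), ('cafe', 0, 0), ('coffee', 0, 0),
--     ('dessert', 1, 0), ('fast food', 3, 1), ('ice cream', 1, 0),
--     ('pizza', 3, 1), ('sweet', 1, 0), ('traditional', 4, 1),
-- ]
--
-- def classify_restaurant_type(name, cuisine):
--     """Classify restaurant type based on name and cuisine"""
--     texts = (name.lower(), cuisine.lower())
--     priorities = [p for kw, p, t in KEYWORDS if kw in texts[t]]
--     return LABELS[min(priorities)] if priorities else 'restaurant'
-- ===== Notes on version B (the rewrite author's own statement) =====
-- stated objective: alternative
-- what changed: Replaced A's short-circuit first-match if/elif cascade by a two-stage aggregation: score all keywords independently (flat alphabetical keyword list, no early exit), collect the priorities of every match, and index a label table by the minimum priority.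
import Mathlib
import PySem

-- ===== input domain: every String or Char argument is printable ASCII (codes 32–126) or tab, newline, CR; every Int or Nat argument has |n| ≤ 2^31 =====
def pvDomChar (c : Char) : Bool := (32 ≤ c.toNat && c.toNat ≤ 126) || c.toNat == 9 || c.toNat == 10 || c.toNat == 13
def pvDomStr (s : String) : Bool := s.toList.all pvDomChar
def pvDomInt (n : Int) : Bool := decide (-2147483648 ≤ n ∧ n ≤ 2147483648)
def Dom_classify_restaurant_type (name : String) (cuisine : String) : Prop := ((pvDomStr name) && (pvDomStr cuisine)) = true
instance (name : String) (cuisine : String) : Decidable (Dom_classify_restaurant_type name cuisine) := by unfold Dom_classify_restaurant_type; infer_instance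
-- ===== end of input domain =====

-- B replaces A's short-circuit if/elif cascade by scoring every keyword independently and
-- taking the minimum matched priority (alternative decomposition, same cost).
-- ===== PORT A =====
def classify_restaurant_type (name : String) (cuisine : String) : String :=
  let name_lower := PySem.Str.lower name
  let cuisine_lower := PySem.Str.lower cuisine
  if ["coffee", "cafe", "brew"].any (fun word => PySem.Str.isIn word name_lower) then "coffee_shop"
  else if ["dessert", "sweet", "ice cream"].any (fun word => PySem.Str.isIn word name_lower) then "dessert_shop"
  else if ["bakery", "bread"].any (fun word => PySem.Str.isIn word name_lower) then "bakery"
  else if ["fast food", "burger", "pizza"].any (fun word => PySem.Str.isIn word cuisine_lower) then "fast_food"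
  else if ["traditional", "bengali", "bangladeshi"].any (fun word => PySem.Str.isIn word cuisine_lower) then "traditional"
  else "restaurant"

-- ===== PORT B =====
def pvLabels : List String := ["coffee_shop", "dessert_shop", "bakery", "fast_food", "traditional"]

-- (keyword, priority, which text: 0 = name, 1 = cuisine), alphabetical order as in Source B
def pvKeywords : List (String × Int × Int) :=
  [("bakery", 2, 0), ("bangladeshi", 4, 1), ("bengali", 4, 1), ("bread", 2, 0),
   ("brew", 0, 0), ("burger", 3, 1), ("cafe", 0, 0), ("coffee", 0, 0),
   ("dessert", 1, 0), ("fast food", 3, 1), ("ice cream", 1, 0),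
   ("pizza", 3, 1), ("sweet", 1, 0), ("traditional", 4, 1)]

-- texts[t] for the pair (hand-ported tuple indexing; t is always the literal 0 or 1)
def pvText (texts : String × String) (t : Int) : String :=
  if t == 0 then texts.1 else texts.2

def classify_restaurant_type_alt (name : String) (cuisine : String) : String :=
  let texts := (PySem.Str.lower name, PySem.Str.lower cuisine)
  let priorities := pvKeywords.filterMap (fun kwt =>
    if PySem.Str.isIn kwt.1 (pvText texts kwt.2.2) then some kwt.2.1 else none)
  match PySem.List.min? priorities (fun x => x) with
  | some m =>
    -- LABELS[m]; m is always in range so the IndexError arm is unreachable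
    match PySem.List.pyGet? pvLabels m with
    | some l => l
    | none => ""
  | none => "restaurant"

-- ===== PRECONDITION & SPEC =====
def Spec_classify_restaurant_type (name : String) (cuisine : String) (out : String) : Prop := out = classify_restaurant_type_alt name cuisine
instance (name : String) (cuisine : String) (out : String) : Decidable (Spec_classify_restaurant_type name cuisine out) := by unfold Spec_classify_restaurant_type; infer_instance

-- ===== CLAIM =====
def Claim_equal_classify_restaurant_type : Prop := ∀ (name : String) (cuisine : String), Dom_classify_restaurant_type name cuisine → Spec_classify_restaurant_type name cuisine (classify_restaurant_type name cuisine)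


-- ===== LEMMAS AND PROOFS =====

-- min of a nonempty Int list whose least element is known
theorem pvMin_eq (P : List Int) (k : Int) (hk : k ∈ P) (hmin : ∀ p ∈ P, k ≤ p) :
    PySem.List.min? P (fun x => x) = some k := by
  cases hP : PySem.List.min? P (fun x => x) with
  | none =>
    rw [PySem.List.min?_eq_none_iff] at hP
    subst hP; cases hk
  | some m =>
    have hm : m ∈ P := PySem.List.min?_mem hP
    have h1 : m ≤ k := PySem.List.min?_isMin hP k hk
    have h2 : k ≤ m := hmin m hm
    have : m = k := le_antisymm h1 h2
    rw [this]


-- ===== VERDICT =====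
theorem classify_restaurant_type_spec : Claim_equal_classify_restaurant_type := by
  intro name cuisine _
  unfold Spec_classify_restaurant_type classify_restaurant_type classify_restaurant_type_alt
  simp only [List.any_cons, List.any_nil, Bool.or_false]
  by_cases h0 : (PySem.Str.isIn "coffee" (PySem.Str.lower name) || (PySem.Str.isIn "cafe" (PySem.Str.lower name) || PySem.Str.isIn "brew" (PySem.Str.lower name))) = true
  · rw [if_pos h0]
    simp only [Bool.or_eq_true] at h0
    rw [pvMin_eq _ 0 ?hm ?hl]
    · rfl
    case hm =>
      rw [List.mem_filterMap]
      rcases h0 with hb | hb | hb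
      · exact ⟨("coffee", 0, 0), by simp [pvKeywords], by simp [pvText]; simpa using hb⟩
      · exact ⟨("cafe", 0, 0), by simp [pvKeywords], by simp [pvText]; simpa using hb⟩
      · exact ⟨("brew", 0, 0), by simp [pvKeywords], by simp [pvText]; simpa using hb⟩
    case hl =>
      intro p hp
      rw [List.mem_filterMap] at hp
      obtain ⟨a, ha, hfa⟩ := hp
      simp only [pvKeywords, List.mem_cons, List.not_mem_nil, or_false] at ha
      rcases ha with rfl|rfl|rfl|rfl|rfl|rfl|rfl|rfl|rfl|rfl|rfl|rfl|rfl|rfl <;>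
        simp [pvText, Option.ite_none_right_eq_some] at hfa <;> omega
  · rw [if_neg h0]
    simp at h0
    by_cases h1 : (PySem.Str.isIn "dessert" (PySem.Str.lower name) || (PySem.Str.isIn "sweet" (PySem.Str.lower name) || PySem.Str.isIn "ice cream" (PySem.Str.lower name))) = true
    · rw [if_pos h1]
      simp only [Bool.or_eq_true] at h1
      rw [pvMin_eq _ 1 ?hm ?hl]
      · rfl
      case hm =>
        rw [List.mem_filterMap]
        rcases h1 with hb | hb | hb
        · exact ⟨("dessert", 1, 0), by simp [pvKeywords], by simp [pvText]; simpa using hb⟩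
        · exact ⟨("sweet", 1, 0), by simp [pvKeywords], by simp [pvText]; simpa using hb⟩
        · exact ⟨("ice cream", 1, 0), by simp [pvKeywords], by simp [pvText]; simpa using hb⟩
      case hl =>
        intro p hp
        rw [List.mem_filterMap] at hp
        obtain ⟨a, ha, hfa⟩ := hp
        simp only [pvKeywords, List.mem_cons, List.not_mem_nil, or_false] at ha
        rcases ha with rfl|rfl|rfl|rfl|rfl|rfl|rfl|rfl|rfl|rfl|rfl|rfl|rfl|rfl <;>
          simp [pvText, Option.ite_none_right_eq_some, h0] at hfa <;> omega
    · rw [if_neg h1]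
      simp at h1
      by_cases h2 : (PySem.Str.isIn "bakery" (PySem.Str.lower name) || PySem.Str.isIn "bread" (PySem.Str.lower name)) = true
      · rw [if_pos h2]
        simp only [Bool.or_eq_true] at h2
        rw [pvMin_eq _ 2 ?hm ?hl]
        · rfl
        case hm =>
          rw [List.mem_filterMap]
          rcases h2 with hb | hb
          · exact ⟨("bakery", 2, 0), by simp [pvKeywords], by simp [pvText]; simpa using hb⟩
          · exact ⟨("bread", 2, 0), by simp [pvKeywords], by simp [pvText]; simpa using hb⟩
        case hl =>
          intro p hp
          rw [List.mem_filterMap] at hp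
          obtain ⟨a, ha, hfa⟩ := hp
          simp only [pvKeywords, List.mem_cons, List.not_mem_nil, or_false] at ha
          rcases ha with rfl|rfl|rfl|rfl|rfl|rfl|rfl|rfl|rfl|rfl|rfl|rfl|rfl|rfl <;>
            simp [pvText, Option.ite_none_right_eq_some, h0, h1] at hfa <;> omega
      · rw [if_neg h2]
        simp at h2
        by_cases h3 : (PySem.Str.isIn "fast food" (PySem.Str.lower cuisine) || (PySem.Str.isIn "burger" (PySem.Str.lower cuisine) || PySem.Str.isIn "pizza" (PySem.Str.lower cuisine))) = true
        · rw [if_pos h3]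
          simp only [Bool.or_eq_true] at h3
          rw [pvMin_eq _ 3 ?hm ?hl]
          · rfl
          case hm =>
            rw [List.mem_filterMap]
            rcases h3 with hb | hb | hb
            · exact ⟨("fast food", 3, 1), by simp [pvKeywords], by simp [pvText]; simpa using hb⟩
            · exact ⟨("burger", 3, 1), by simp [pvKeywords], by simp [pvText]; simpa using hb⟩
            · exact ⟨("pizza", 3, 1), by simp [pvKeywords], by simp [pvText]; simpa using hb⟩
          case hl =>
            intro p hp
            rw [List.mem_filterMap] at hp
            obtain ⟨a, ha, hfa⟩ := hp
            simp only [pvKeywords, List.mem_cons, List.not_mem_nil, or_false] at ha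
            rcases ha with rfl|rfl|rfl|rfl|rfl|rfl|rfl|rfl|rfl|rfl|rfl|rfl|rfl|rfl <;>
              simp [pvText, Option.ite_none_right_eq_some, h0, h1, h2] at hfa <;> omega
        · rw [if_neg h3]
          simp at h3
          by_cases h4 : (PySem.Str.isIn "traditional" (PySem.Str.lower cuisine) || (PySem.Str.isIn "bengali" (PySem.Str.lower cuisine) || PySem.Str.isIn "bangladeshi" (PySem.Str.lower cuisine))) = true
          · rw [if_pos h4]
            simp only [Bool.or_eq_true] at h4
            rw [pvMin_eq _ 4 ?hm ?hl]
            · rfl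
            case hm =>
              rw [List.mem_filterMap]
              rcases h4 with hb | hb | hb
              · exact ⟨("traditional", 4, 1), by simp [pvKeywords], by simp [pvText]; simpa using hb⟩
              · exact ⟨("bengali", 4, 1), by simp [pvKeywords], by simp [pvText]; simpa using hb⟩
              · exact ⟨("bangladeshi", 4, 1), by simp [pvKeywords], by simp [pvText]; simpa using hb⟩
            case hl =>
              intro p hp
              rw [List.mem_filterMap] at hp
              obtain ⟨a, ha, hfa⟩ := hp
              simp only [pvKeywords, List.mem_cons, List.not_mem_nil, or_false] at ha
              rcases ha with rfl|rfl|rfl|rfl|rfl|rfl|rfl|rfl|rfl|rfl|rfl|rfl|rfl|rfl <;>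
                simp [pvText, Option.ite_none_right_eq_some, h0, h1, h2, h3] at hfa <;> omega
          · rw [if_neg h4]
            simp at h4
            rw [List.filterMap_eq_nil_iff.mpr ?he]
            · rfl
            case he =>
              intro a ha
              simp only [pvKeywords, List.mem_cons, List.not_mem_nil, or_false] at ha
              rcases ha with rfl|rfl|rfl|rfl|rfl|rfl|rfl|rfl|rfl|rfl|rfl|rfl|rfl|rfl <;>
                simp [pvText, h0, h1, h2, h3, h4]
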